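-- pv_equiv track=rewrite | github.com/horitaku/md2html | sub_func.py | conv_p
-- ===== SOURCE A (Python) =====
-- def check_p_start(listx,state_code):
--     if listx.startswith('<h'):
--         return False, state_code
--     elif listx.startswith('<div class="highlighter-rouge"><div class="highlight"><pre class="highlight"><code>'):
--         state_code=1   # <div code ～</code の間
--         return False, state_code
--     elif listx.startswith('</code></pre></div></div>'):
--         state_code=0
--         return False, state_code
--     elif listx.startswith('<ul>'):
--         state_code=2  # <ul> ～</ul>の間
--         return False, state_code
--     elif listx.startswith('</ul>'):
--         state_code=0
--         return False, state_code
--     elif listx.startswith('<ol>'):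
--         state_code=2  # <ol> ～</ol>の間
--         return False, state_code
--     elif listx.startswith('</ol>'):
--         state_code=0
--         return False, state_code
--     elif listx.startswith('<br />'): # 先頭が<br />の行
--         return False, state_code
--     elif len(listx) == 0:  # 空白の行は無視する
--         return False, state_code
--     else:
--         return True, state_code
--
-- def conv_p(listxs):
--     # <p></p>を挿入する
--     listxs2=[]
--     s1=-1
--     state_code=0
--     for i,list0 in enumerate(listxs):
--         rt_code, state_code= check_p_start(list0, state_code)
--         if rt_code and state_code ==0 and s1 <0:
--             listxs2.append('<p>' + list0)
--             s1=i  # <p>の始まり区間の行番号をセット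
--         elif s1 >=0 :
--             if (not rt_code)  or  state_code != 0:  #<p>対象区間でない　<div code, <ul　区間でない場合
--                 s1=-1 # リセット
--                 listxs2[len(listxs2)-1]= listxs2[len(listxs2)-1]  + '</p>' # 1行前の末尾に</p>を追加
--             listxs2.append(list0)
--         else:
--             listxs2.append(list0)
--
--     if s1 >=0:  # 最後の行で閉じる場合
--     	listxs2[ len(listxs2)-1]= listxs2[ len(listxs2)-1] + ('</p>')
--
--     return listxs2
-- ===== SOURCE B (Python) =====
-- # Classify-then-group re-implementation: first pass builds a paragraph flag per
-- # line (table-driven prefix classifier), second pass wraps maximal runs of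
-- # paragraph lines wholesale; no back-patching of the output list.
--
-- _PREFIX_STATE = [
--     ('<h', None),
--     ('<div class="highlighter-rouge"><div class="highlight"><pre class="highlight"><code>', 1),
--     ('</code></pre></div></div>', 0),
--     ('<ul>', 2),
--     ('</ul>', 0),
--     ('<ol>', 2),
--     ('</ol>', 0),
--     ('<br />', None),
-- ]
--
-- def _classify(line, state):
--     for prefix, new_state in _PREFIX_STATE:
--         if line.startswith(prefix):
--             return False, (state if new_state is None else new_state)
--     if len(line) == 0:
--         return False, state
--     return True, state
--
-- def _wrap_run(run):
--     if len(run) == 1: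
--         return ['<p>' + run[0] + '</p>']
--     return ['<p>' + run[0]] + run[1:-1] + [run[-1] + '</p>']
--
-- def conv_p(listxs):
--     state = 0
--     pairs = []
--     for line in listxs:
--         ok, state = _classify(line, state)
--         pairs.append((ok and state == 0, line))
--     out = []
--     run = []
--     for is_para, line in pairs:
--         if is_para:
--             run.append(line)
--         else:
--             if run:
--                 out.extend(_wrap_run(run))
--                 run = []
--             out.append(line)
--     if run:
--         out.extend(_wrap_run(run))
--     return out
-- ===== Notes on version B (the rewrite author's own statement) =====
-- stated objective: alternative
-- what changed: A streams the output while back-patching its last element with '</p>' and tracking an open-paragraph index s1; B first classifies every line into a paragraph flag with a table-driven prefix classifier, then wraps each maximal run of paragraph lines wholesale in a second pass, never patching already-emitted output.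
import Mathlib
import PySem

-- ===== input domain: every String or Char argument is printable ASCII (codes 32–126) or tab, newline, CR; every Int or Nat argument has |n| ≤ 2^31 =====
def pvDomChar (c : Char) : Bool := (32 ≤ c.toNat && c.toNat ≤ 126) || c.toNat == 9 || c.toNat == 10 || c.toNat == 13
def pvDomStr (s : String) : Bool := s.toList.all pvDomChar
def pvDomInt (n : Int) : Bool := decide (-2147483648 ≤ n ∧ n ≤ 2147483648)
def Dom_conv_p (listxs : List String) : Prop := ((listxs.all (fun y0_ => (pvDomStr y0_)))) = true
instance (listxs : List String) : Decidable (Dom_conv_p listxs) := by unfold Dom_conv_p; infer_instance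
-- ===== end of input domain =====

-- B differs from A by decomposition: A streams the output and back-patches its last
-- element to close a paragraph; B classifies every line first, then wraps maximal runs
-- of paragraph lines wholesale (objective: alternative; same exact output).

-- ===== PORT A =====
-- helper check_p_start of A (returns (rt_code, state_code))
def check_p_start (listx : String) (state_code : Int) : Bool × Int :=
  if PySem.Str.startswith listx "<h" then (false, state_code)
  else if PySem.Str.startswith listx "<div class=\"highlighter-rouge\"><div class=\"highlight\"><pre class=\"highlight\"><code>" then (false, 1)
  else if PySem.Str.startswith listx "</code></pre></div></div>" then (false, 0)
  else if PySem.Str.startswith listx "<ul>" then (false, 2)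
  else if PySem.Str.startswith listx "</ul>" then (false, 0)
  else if PySem.Str.startswith listx "<ol>" then (false, 2)
  else if PySem.Str.startswith listx "</ol>" then (false, 0)
  else if PySem.Str.startswith listx "<br />" then (false, state_code)
  else if PySem.Str.len listx = 0 then (false, state_code)
  else (true, state_code)

-- listxs2[len(listxs2)-1] += '</p>' (A only does this on a nonempty list)
def convPSetLast : List String → List String
  | [] => []
  | [x] => [x ++ "</p>"]
  | x :: y :: rest => x :: convPSetLast (y :: rest)

-- A's for-loop: state (listxs2 = acc, s1, state_code), i the enumerate index
def convPLoopA : List String → Int → List String → Int → Int → List String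
  | [], _, acc, s1, _ => if s1 ≥ 0 then convPSetLast acc else acc
  | list0 :: rest, i, acc, s1, st =>
      let p := check_p_start list0 st
      if p.1 ∧ p.2 = 0 ∧ s1 < 0 then
        convPLoopA rest (i + 1) (acc ++ ["<p>" ++ list0]) i p.2
      else if s1 ≥ 0 then
        if ¬ p.1 ∨ p.2 ≠ 0 then
          convPLoopA rest (i + 1) (convPSetLast acc ++ [list0]) (-1) p.2
        else
          convPLoopA rest (i + 1) (acc ++ [list0]) s1 p.2
      else
        convPLoopA rest (i + 1) (acc ++ [list0]) s1 p.2

def conv_p (listxs : List String) : List String :=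
  convPLoopA listxs 0 [] (-1) 0

-- ===== PORT B =====
-- table-driven classifier of B (prefix, Option new_state)
def convPPrefixTable : List (String × Option Int) :=
  [("<h", none),
   ("<div class=\"highlighter-rouge\"><div class=\"highlight\"><pre class=\"highlight\"><code>", some 1),
   ("</code></pre></div></div>", some 0),
   ("<ul>", some 2),
   ("</ul>", some 0),
   ("<ol>", some 2),
   ("</ol>", some 0),
   ("<br />", none)]

def convPClassify (line : String) (state : Int) : Bool × Int :=
  match convPPrefixTable.find? (fun p => PySem.Str.startswith line p.1) with
  | some (_, ns) => (false, ns.getD state)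
  | none => if PySem.Str.len line = 0 then (false, state) else (true, state)

-- first pass: pairs of (is_para flag, line)
def convPPairs : List String → Int → List (Bool × String)
  | [], _ => []
  | line :: rest, state =>
      let p := convPClassify line state
      (p.1 && p.2 == 0, line) :: convPPairs rest p.2

-- _wrap_run of B
def convPWrapRun (run : List String) : List String :=
  if run.length = 1 then ["<p>" ++ run.head! ++ "</p>"]
  else ("<p>" ++ run.head!) :: run.tail.dropLast ++ [run.getLast! ++ "</p>"]

-- second pass: group maximal runs of paragraph lines and wrap them
def convPLoopB : List (Bool × String) → List String → List String
  | [], run => if run.isEmpty then [] else convPWrapRun run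
  | (isPara, line) :: rest, run =>
      if isPara then convPLoopB rest (run ++ [line])
      else (if run.isEmpty then [] else convPWrapRun run) ++ line :: convPLoopB rest []

def conv_p_alt (listxs : List String) : List String :=
  convPLoopB (convPPairs listxs 0) []

-- ===== PRECONDITION & SPEC =====
def Spec_conv_p (listxs : List String) (out : List String) : Prop := out = conv_p_alt listxs
instance (listxs : List String) (out : List String) : Decidable (Spec_conv_p listxs out) := by unfold Spec_conv_p; infer_instance

-- ===== CLAIM (what is proved, stated in full; the proofs are below) =====
def Claim_equal_conv_p : Prop := ∀ (listxs : List String), Dom_conv_p listxs → Spec_conv_p listxs (conv_p listxs)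

-- ===== LEMMAS AND PROOFS =====

-- B's classifier agrees with A's helper
theorem convPClassify_eq (l : String) (st : Int) : convPClassify l st = check_p_start l st := by
  unfold convPClassify convPPrefixTable check_p_start
  by_cases h1 : PySem.Str.startswith l "<h" = true
  · rw [List.find?_cons_of_pos (by simpa using h1)]
    simp only [if_pos h1]
    rfl
  rw [List.find?_cons_of_neg (by simpa using h1)]
  by_cases h2 : PySem.Str.startswith l "<div class=\"highlighter-rouge\"><div class=\"highlight\"><pre class=\"highlight\"><code>" = true
  · rw [List.find?_cons_of_pos (by simpa using h2)]
    simp only [if_neg h1, if_pos h2]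
    rfl
  rw [List.find?_cons_of_neg (by simpa using h2)]
  by_cases h3 : PySem.Str.startswith l "</code></pre></div></div>" = true
  · rw [List.find?_cons_of_pos (by simpa using h3)]
    simp only [if_neg h1, if_neg h2, if_pos h3]
    rfl
  rw [List.find?_cons_of_neg (by simpa using h3)]
  by_cases h4 : PySem.Str.startswith l "<ul>" = true
  · rw [List.find?_cons_of_pos (by simpa using h4)]
    simp only [if_neg h1, if_neg h2, if_neg h3, if_pos h4]
    rfl
  rw [List.find?_cons_of_neg (by simpa using h4)]
  by_cases h5 : PySem.Str.startswith l "</ul>" = true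
  · rw [List.find?_cons_of_pos (by simpa using h5)]
    simp only [if_neg h1, if_neg h2, if_neg h3, if_neg h4, if_pos h5]
    rfl
  rw [List.find?_cons_of_neg (by simpa using h5)]
  by_cases h6 : PySem.Str.startswith l "<ol>" = true
  · rw [List.find?_cons_of_pos (by simpa using h6)]
    simp only [if_neg h1, if_neg h2, if_neg h3, if_neg h4, if_neg h5, if_pos h6]
    rfl
  rw [List.find?_cons_of_neg (by simpa using h6)]
  by_cases h7 : PySem.Str.startswith l "</ol>" = true
  · rw [List.find?_cons_of_pos (by simpa using h7)]
    simp only [if_neg h1, if_neg h2, if_neg h3, if_neg h4, if_neg h5, if_neg h6, if_pos h7]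
    rfl
  rw [List.find?_cons_of_neg (by simpa using h7)]
  by_cases h8 : PySem.Str.startswith l "<br />" = true
  · rw [List.find?_cons_of_pos (by simpa using h8)]
    simp only [if_neg h1, if_neg h2, if_neg h3, if_neg h4, if_neg h5, if_neg h6, if_neg h7, if_pos h8]
    rfl
  rw [List.find?_cons_of_neg (by simpa using h8)]
  rw [List.find?_nil]
  simp only [if_neg h1, if_neg h2, if_neg h3, if_neg h4, if_neg h5, if_neg h6, if_neg h7, if_neg h8]

-- the open-run prefix of A's acc while inside a paragraph run
def convPOpenPre : List String → List String
  | [] => []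
  | x :: rest => ("<p>" ++ x) :: rest

theorem convPOpenPre_ne_nil (x : String) (rest : List String) :
    convPOpenPre (x :: rest) ≠ [] := by simp [convPOpenPre]

theorem convPSetLast_append (a r : List String) (hr : r ≠ []) :
    convPSetLast (a ++ r) = a ++ convPSetLast r := by
  induction a with
  | nil => rfl
  | cons x xs ih =>
      cases h : xs ++ r with
      | nil => exact absurd (List.append_eq_nil_iff.mp h).2 hr
      | cons y ys =>
          calc convPSetLast (x :: xs ++ r) = convPSetLast (x :: y :: ys) := by
                rw [List.cons_append, h]
            _ = x :: convPSetLast (y :: ys) := rfl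
            _ = x :: convPSetLast (xs ++ r) := by rw [h]
            _ = x :: (xs ++ convPSetLast r) := by rw [ih]
            _ = x :: xs ++ convPSetLast r := rfl

theorem convPSetLast_openPre (x : String) (rest : List String) :
    convPSetLast (convPOpenPre (x :: rest)) = convPWrapRun (x :: rest) := by
  cases rest with
  | nil => simp [convPOpenPre, convPSetLast, convPWrapRun]
  | cons y zs =>
      simp only [convPOpenPre, convPWrapRun]
      rw [if_neg (by simp)]
      have h2 : ∀ (y : String) (zs : List String),
          convPSetLast (y :: zs) = (y :: zs).dropLast ++ [(y :: zs).getLast! ++ "</p>"] := by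
        intro y zs
        induction zs generalizing y with
        | nil => simp [convPSetLast, List.getLast!]
        | cons z ws ih => simp [convPSetLast, ih]
      simp [convPSetLast, h2, List.getLast!]

theorem convPOpenPre_append (x : String) (rest : List String) (l : String) :
    convPOpenPre ((x :: rest) ++ [l]) = convPOpenPre (x :: rest) ++ [l] := by
  simp [convPOpenPre]

-- main loop correspondence: A's loop on (acc, s1, state) matches B's run-grouping pass
theorem convPLoop_eq (xs : List String) : ∀ (st i : Int) (acc run : List String) (s1 : Int),
    0 ≤ i → (run = [] → s1 < 0) → (run ≠ [] → 0 ≤ s1) →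
    convPLoopA xs i (acc ++ convPOpenPre run) s1 st = acc ++ convPLoopB (convPPairs xs st) run := by
  induction xs with
  | nil =>
      intro st i acc run s1 _ h0 h1
      cases run with
      | nil =>
          have := h0 rfl
          simp [convPLoopA, convPPairs, convPLoopB, convPOpenPre, not_le.mpr this]
      | cons x rest =>
          have hs : 0 ≤ s1 := h1 (by simp)
          simp only [convPLoopA, convPPairs, convPLoopB, ge_iff_le, hs, if_true,
            List.isEmpty_cons, Bool.false_eq_true, if_false]
          rw [convPSetLast_append acc (convPOpenPre (x :: rest)) (convPOpenPre_ne_nil x rest),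
            convPSetLast_openPre]
  | cons l ls ih =>
      intro st i acc run s1 hi h0 h1
      simp only [convPLoopA, convPPairs, convPLoopB, convPClassify_eq]
      set p := check_p_start l st with hp
      by_cases hpara : p.1 = true ∧ p.2 = 0
      · -- paragraph line
        have hflag : (p.1 && p.2 == 0) = true := by simp [hpara.1, hpara.2]
        rw [hflag]
        simp only [if_true]
        cases run with
        | nil =>
            have hs : s1 < 0 := h0 rfl
            rw [if_pos ⟨hpara.1, hpara.2, hs⟩]
            have := ih p.2 (i + 1) acc [l] i (by omega) (by simp) (fun _ => hi)
            simpa [convPOpenPre] using this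
        | cons x rest =>
            have hs : 0 ≤ s1 := h1 (by simp)
            rw [if_neg (fun hc => absurd hc.2.2 (by omega)), if_pos (by omega),
              if_neg (by simp [hpara.1, hpara.2])]
            have := ih p.2 (i + 1) acc ((x :: rest) ++ [l]) s1 (by omega) (by simp) (fun _ => hs)
            rw [convPOpenPre_append, ← List.append_assoc] at this
            exact this
      · -- non-paragraph line
        have hflag : (p.1 && p.2 == 0) = false := by
          cases hb : p.1 <;> simp_all
        rw [hflag]
        simp only [Bool.false_eq_true, if_false]
        have hcnd : ¬ p.1 = true ∨ p.2 ≠ 0 := by tauto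
        cases run with
        | nil =>
            have hs : s1 < 0 := h0 rfl
            rw [if_neg (fun hc => hpara ⟨hc.1, hc.2.1⟩), if_neg (by omega)]
            have := ih p.2 (i + 1) (acc ++ [l]) [] s1 (by omega) (fun _ => hs) (by simp)
            simp only [convPOpenPre, List.append_nil] at this
            simpa [convPOpenPre, List.append_assoc] using this
        | cons x rest =>
            have hs : 0 ≤ s1 := h1 (by simp)
            rw [if_neg (fun hc => absurd hc.2.2 (by omega)), if_pos (by omega), if_pos hcnd]
            rw [convPSetLast_append acc (convPOpenPre (x :: rest)) (convPOpenPre_ne_nil x rest),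
              convPSetLast_openPre]
            have := ih p.2 (i + 1) (acc ++ convPWrapRun (x :: rest) ++ [l]) [] (-1) (by omega)
              (fun _ => by norm_num) (by simp)
            simp only [convPOpenPre, List.append_nil] at this
            rw [this]
            simp [List.append_assoc]

-- ===== VERDICT (by name: the statement is the Claim_ definition above) =====
theorem conv_p_spec : Claim_equal_conv_p := by
  intro listxs _
  unfold Spec_conv_p conv_p conv_p_alt
  have := convPLoop_eq listxs 0 0 [] [] (-1) le_rfl (fun _ => by omega) (fun h => absurd rfl h)
  simpa [convPOpenPre] using this
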